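-- pv_equiv track=rewrite | github.com/fob-Ji/KHJL_algo_study_Source_code | EighthWeek/first_greedy_ruleOfBigNumber.py | solution
-- ===== SOURCE A (Python) =====
-- def solution(N,M,K,numbers):
--     data = sorted(numbers)
--     m = M
--     first = data[N-1]
--     second = data[N-2]
--
--     answer = 0
--
--     while True:
--         for i in range(K):
--             if m==0:
--                 break
--             answer+= first
--             m -=1
--         if m==0:
--             break
--         answer += second
--         m -=1
--
--     return answer
-- ===== SOURCE B (Python) =====
-- def solution(N, M, K, numbers):
--     data = sorted(numbers)
--     first = data[N - 1]
--     second = data[N - 2]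
--     # M additions follow a period of K+1: K copies of first, then one second.
--     full, rem = divmod(M, K + 1)
--     return (full * K + rem) * first + full * second
-- ===== Notes on version B (the rewrite author's own statement) =====
-- stated objective: simpler
-- what changed: Replaces A's while/for simulation of all M additions with closed-form divmod arithmetic on the period-(K+1) pattern (K firsts then one second).
-- outside the precondition, e.g. on solution(2, 3, -1, [1, 2]): A returns 3, B raises ZeroDivisionError
import Mathlib
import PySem

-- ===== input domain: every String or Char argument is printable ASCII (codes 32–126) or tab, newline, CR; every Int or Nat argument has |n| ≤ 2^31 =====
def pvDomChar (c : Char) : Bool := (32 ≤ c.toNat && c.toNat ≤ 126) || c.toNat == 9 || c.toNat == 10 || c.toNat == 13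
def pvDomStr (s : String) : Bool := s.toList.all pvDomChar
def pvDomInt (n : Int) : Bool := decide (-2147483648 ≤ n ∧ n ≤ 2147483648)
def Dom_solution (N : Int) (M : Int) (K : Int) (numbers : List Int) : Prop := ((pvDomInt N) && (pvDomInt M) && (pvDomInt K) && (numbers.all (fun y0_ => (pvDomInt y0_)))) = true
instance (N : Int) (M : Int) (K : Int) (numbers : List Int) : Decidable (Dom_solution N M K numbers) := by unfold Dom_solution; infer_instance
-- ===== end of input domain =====

-- B replaces A's one-by-one addition loop with closed-form divmod arithmetic
-- on the period-(K+1) pattern (objective: simpler).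

-- ===== PORT A =====
-- inner 'for i in range(K): if m==0: break; answer += first; m -= 1'
def solAInner : Nat → Int → Int → Int → Int × Int
  | 0, _, m, answer => (m, answer)
  | i + 1, first, m, answer =>
    if m = 0 then (m, answer) else solAInner i first (m - 1) (answer + first)

-- outer 'while True' loop; fuel = M.toNat + 1 suffices since each pass with m > 0
-- decreases m (fuel only runs out where Python A loops forever, i.e. outside Pre_)
def solAOuter : Nat → Nat → Int → Int → Int → Int → Int
  | 0, _, _, _, _, answer => answer
  | fuel + 1, kt, first, second, m, answer =>
    let p := solAInner kt first m answer
    if p.1 = 0 then p.2 else solAOuter fuel kt first second (p.1 - 1) (p.2 + second)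

def solution (N : Int) (M : Int) (K : Int) (numbers : List Int) : Int :=
  let data := PySem.List.sorted numbers (fun x => x) false
  match PySem.List.pyGet? data (N - 1), PySem.List.pyGet? data (N - 2) with
  | some first, some second => solAOuter (M.toNat + 1) K.toNat first second M 0
  | _, _ => 0   -- IndexError in Python; outside Pre_

-- ===== PORT B =====
def solution_alt (N : Int) (M : Int) (K : Int) (numbers : List Int) : Int :=
  let data := PySem.List.sorted numbers (fun x => x) false
  (PySem.List.pyGet? data (N - 1)).elim 0 (fun first =>      -- none = IndexError; outside Pre_
    (PySem.List.pyGet? data (N - 2)).elim 0 (fun second =>   -- none = IndexError; outside Pre_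
      (PySem.Int.divmod? M (K + 1)).elim 0 (fun fr =>        -- none = ZeroDivisionError; outside Pre_
        (fr.1 * K + fr.2) * first + fr.1 * second)))

-- ===== PRECONDITION & SPEC =====
-- Pre_ excludes: indices N-1/N-2 out of range (A raises IndexError), negative M
-- (A's while loop never terminates), and negative K, where A's empty range(K) adds
-- only `second` while B's period arithmetic divides by K+1 (raising/deviating).
def Pre_solution (N : Int) (M : Int) (K : Int) (numbers : List Int) : Prop :=
  PySem.Raise.InRange numbers.length (N - 1) ∧ PySem.Raise.InRange numbers.length (N - 2) ∧ 0 ≤ M ∧ 0 ≤ K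
instance (N : Int) (M : Int) (K : Int) (numbers : List Int) : Decidable (Pre_solution N M K numbers) := by unfold Pre_solution; infer_instance
def pvWitness_solution : Int × Int × Int × List Int := (2, 7, 2, [3, 5])

def Spec_solution (N : Int) (M : Int) (K : Int) (numbers : List Int) (out : Int) : Prop := out = solution_alt N M K numbers
instance (N : Int) (M : Int) (K : Int) (numbers : List Int) (out : Int) : Decidable (Spec_solution N M K numbers out) := by unfold Spec_solution; infer_instance

-- ===== CLAIM (what is proved, stated in full; the proofs are below) =====
def Claim_equal_solution : Prop := ∀ (N : Int) (M : Int) (K : Int) (numbers : List Int), Dom_solution N M K numbers → Pre_solution N M K numbers → Spec_solution N M K numbers (solution N M K numbers)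

-- ===== LEMMAS AND PROOFS =====

-- A's inner for-loop adds `first` min(k, m) times.
theorem solAInner_spec (k : Nat) (first m answer : Int) (hm : 0 ≤ m) :
    solAInner k first m answer =
      if (k : Int) ≤ m then (m - k, answer + k * first) else (0, answer + m * first) := by
  induction k generalizing m answer with
  | zero => simp [solAInner, hm]
  | succ k ih =>
    by_cases h0 : m = 0
    · subst h0
      simp [solAInner]
    · have hm1 : 0 ≤ m - 1 := by omega
      rw [solAInner, if_neg h0, ih _ _ hm1]
      by_cases hle : ((k : Int) + 1) ≤ m
      · rw [if_pos (show (k : Int) ≤ m - 1 by omega),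
            if_pos (show ((k + 1 : Nat) : Int) ≤ m by push_cast; omega)]
        simp only [Prod.mk.injEq]
        exact ⟨by push_cast; ring, by push_cast; ring⟩
      · rw [if_neg (show ¬ (k : Int) ≤ m - 1 by omega),
            if_neg (show ¬ ((k + 1 : Nat) : Int) ≤ m by push_cast; omega)]
        simp only [Prod.mk.injEq]
        exact ⟨trivial, by ring⟩

-- A's whole loop in closed form (ediv/emod; divisor kt+1 > 0).
theorem solAOuter_spec (fuel kt : Nat) (first second m answer : Int)
    (hm : 0 ≤ m) (hf : m.toNat < fuel) :
    solAOuter fuel kt first second m answer =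
      answer + (m / ((kt : Int) + 1)) * ((kt : Int) * first + second)
             + (m % ((kt : Int) + 1)) * first := by
  induction fuel generalizing m answer with
  | zero => omega
  | succ fuel ih =>
    rw [solAOuter, solAInner_spec kt first m answer hm]
    have hne : ((kt : Int) + 1) ≠ 0 := by omega
    by_cases hle : (kt : Int) ≤ m
    · rw [if_pos hle]
      by_cases hz : m - (kt : Int) = 0
      · rw [if_pos hz]
        have hm' : m = (kt : Int) := by omega
        rw [hm', Int.ediv_eq_zero_of_lt (by omega) (by omega),
            Int.emod_eq_of_lt (by omega) (by omega)]
        ring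
      · rw [if_neg hz]
        have hrec : 0 ≤ m - (kt : Int) - 1 := by omega
        have hfr : (m - (kt : Int) - 1).toNat < fuel := by omega
        rw [ih _ _ hrec hfr]
        have e1 : m = (m - (kt : Int) - 1) + 1 * ((kt : Int) + 1) := by ring
        have h1 : m / ((kt : Int) + 1) = (m - (kt : Int) - 1) / ((kt : Int) + 1) + 1 := by
          conv_lhs => rw [e1]
          rw [Int.add_mul_ediv_right _ _ hne]
        have h2 : m % ((kt : Int) + 1) = (m - (kt : Int) - 1) % ((kt : Int) + 1) := by
          conv_lhs => rw [e1]
          exact Int.add_mul_emod_self_right _ _ _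
        rw [h1, h2]; ring
    · rw [if_neg hle, if_pos rfl]
      rw [Int.ediv_eq_zero_of_lt (by omega) (by omega),
          Int.emod_eq_of_lt (by omega) (by omega)]
      ring

-- ===== VERDICT (by name: the statement is the Claim_ definition above) =====
theorem solution_spec : Claim_equal_solution := by
  intro N M K numbers _ hpre
  obtain ⟨h1, h2, hM, hK⟩ := hpre
  unfold Spec_solution solution solution_alt
  have hlen := PySem.List.length_sorted numbers (fun x => x) false
  obtain ⟨first, hg1⟩ : ∃ a, PySem.List.pyGet? (PySem.List.sorted numbers (fun x => x) false) (N - 1) = some a := by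
    cases hg : PySem.List.pyGet? (PySem.List.sorted numbers (fun x => x) false) (N - 1) with
    | none => exact absurd ((PySem.List.pyGet?_eq_none_iff _ _).mp hg) (by rw [hlen]; exact not_not_intro h1)
    | some a => exact ⟨a, rfl⟩
  obtain ⟨second, hg2⟩ : ∃ a, PySem.List.pyGet? (PySem.List.sorted numbers (fun x => x) false) (N - 2) = some a := by
    cases hg : PySem.List.pyGet? (PySem.List.sorted numbers (fun x => x) false) (N - 2) with
    | none => exact absurd ((PySem.List.pyGet?_eq_none_iff _ _).mp hg) (by rw [hlen]; exact not_not_intro h2)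
    | some a => exact ⟨a, rfl⟩
  simp only [hg1, hg2, Option.elim]
  have hdm : PySem.Int.divmod? M (K + 1) = some (PySem.Int.floordiv M (K + 1), PySem.Int.mod M (K + 1)) := by
    simp [PySem.Int.divmod?, PySem.Int.floordiv, PySem.Int.mod]
    omega
  rw [hdm]
  rw [solAOuter_spec (M.toNat + 1) K.toNat first second M 0 hM (by omega)]
  rw [Int.toNat_of_nonneg hK]
  rw [PySem.Int.floordiv_eq_ediv_of_pos (by omega : (0:Int) < K + 1),
      PySem.Int.mod_eq_emod_of_pos (by omega : (0:Int) < K + 1)]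
  ring
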